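-- pv_equiv track=rewrite | github.com/EnterPC-Core/jarvis_portable_2026-03-24 | utils/message_utils.py | describe_message_media_kind
-- ===== SOURCE A (Python) =====
-- def describe_message_media_kind(message: dict) -> str:
--     if message.get("photo"):
--         return "photo"
--     if message.get("voice"):
--         return "voice"
--     if message.get("video"):
--         return "video"
--     if message.get("video_note"):
--         return "video_note"
--     if message.get("document"):
--         document = message.get("document") or {}
--         file_name = document.get("file_name") or "document"
--         mime_type = document.get("mime_type") or ""
--         return " ".join(part for part in [file_name, f"({mime_type})" if mime_type else ""] if part).strip()
--     if message.get("sticker"):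
--         return "sticker"
--     if message.get("animation"):
--         return "gif"
--     if message.get("audio"):
--         return "audio"
--     return ""
-- ===== SOURCE B (Python) =====
-- _MEDIA = {
--     "photo": (0, "photo"),
--     "voice": (1, "voice"),
--     "video": (2, "video"),
--     "video_note": (3, "video_note"),
--     "document": (4, "document"),
--     "sticker": (5, "sticker"),
--     "animation": (6, "gif"),
--     "audio": (7, "audio"),
-- }
--
--
-- def describe_message_media_kind(message: dict) -> str:
--     # Single pass over the message's own entries, keeping the truthy media
--     # entry of minimum priority, instead of probing each candidate key.
--     best = None  # (rank, label, value)
--     for key, value in message.items():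
--         info = _MEDIA.get(key)
--         if info is not None and value and (best is None or info[0] < best[0]):
--             best = (info[0], info[1], value)
--     if best is None:
--         return ""
--     rank, label, value = best
--     if rank == 4:
--         file_name = value.get("file_name") or "document"
--         mime_type = value.get("mime_type") or ""
--         parts = [file_name]
--         if mime_type:
--             parts.append(f"({mime_type})")
--         return " ".join(parts).strip()
--     return label
-- ===== Notes on version B (the rewrite author's own statement) =====
-- stated objective: alternative
-- what changed: B makes a single pass over the message's own entries keeping the truthy media entry of minimum priority (an argmin accumulator over items()), instead of A's fixed sequence of eight keyed lookups; Pre_ only excludes association lists with duplicate keys, which no Python dict input can have.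
import Mathlib
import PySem

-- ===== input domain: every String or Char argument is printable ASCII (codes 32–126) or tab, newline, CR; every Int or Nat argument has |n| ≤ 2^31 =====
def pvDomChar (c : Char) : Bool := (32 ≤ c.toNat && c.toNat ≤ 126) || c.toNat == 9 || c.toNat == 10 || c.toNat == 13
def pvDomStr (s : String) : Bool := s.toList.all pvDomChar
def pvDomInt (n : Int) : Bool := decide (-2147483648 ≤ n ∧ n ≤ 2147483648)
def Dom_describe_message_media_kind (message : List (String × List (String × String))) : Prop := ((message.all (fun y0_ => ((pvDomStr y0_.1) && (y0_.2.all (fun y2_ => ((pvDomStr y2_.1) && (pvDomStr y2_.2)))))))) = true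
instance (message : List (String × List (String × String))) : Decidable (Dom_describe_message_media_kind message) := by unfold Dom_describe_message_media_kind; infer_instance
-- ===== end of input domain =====

-- B replaces A's fixed sequence of eight keyed lookups by one pass over the message's
-- entries keeping the truthy media entry of minimum priority; objective: alternative.

-- ===== PORT A =====
-- Python truthiness of `message.get(k)` (Option of a dict): some nonempty dict
def pvTruthy (o : Option (List (String × String))) : Bool :=
  match o with
  | none => false
  | some d => !d.isEmpty

-- `x or default` on an optional dict / string
def pvOrDict (o : Option (List (String × String))) : List (String × String) :=
  match o with
  | none => []
  | some d => if d.isEmpty then [] else d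

def pvOrStr (o : Option String) (dflt : String) : String :=
  match o with
  | none => dflt
  | some s => if s = "" then dflt else s

def describe_message_media_kind (message : List (String × List (String × String))) : String :=
  if pvTruthy (PySem.Dict.get? ⟨message⟩ "photo") then "photo"
  else if pvTruthy (PySem.Dict.get? ⟨message⟩ "voice") then "voice"
  else if pvTruthy (PySem.Dict.get? ⟨message⟩ "video") then "video"
  else if pvTruthy (PySem.Dict.get? ⟨message⟩ "video_note") then "video_note"
  else if pvTruthy (PySem.Dict.get? ⟨message⟩ "document") then
    let document := pvOrDict (PySem.Dict.get? ⟨message⟩ "document")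
    let file_name := pvOrStr (PySem.Dict.get? ⟨document⟩ "file_name") "document"
    let mime_type := pvOrStr (PySem.Dict.get? ⟨document⟩ "mime_type") ""
    PySem.Str.strip (PySem.Str.join " "
      (([file_name, if mime_type ≠ "" then "(" ++ mime_type ++ ")" else ""]).filter (fun part => part ≠ "")))
  else if pvTruthy (PySem.Dict.get? ⟨message⟩ "sticker") then "sticker"
  else if pvTruthy (PySem.Dict.get? ⟨message⟩ "animation") then "gif"
  else if pvTruthy (PySem.Dict.get? ⟨message⟩ "audio") then "audio"
  else ""

-- ===== PORT B =====
-- _MEDIA: key -> (rank, label)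
def pvMedia : PySem.Dict String (Nat × String) :=
  ⟨[("photo", (0, "photo")), ("voice", (1, "voice")), ("video", (2, "video")),
    ("video_note", (3, "video_note")), ("document", (4, "document")),
    ("sticker", (5, "sticker")), ("animation", (6, "gif")), ("audio", (7, "audio"))]⟩

-- one loop iteration of Source B: keep the truthy media entry of minimum rank
def pvStep (best : Option (Nat × String × List (String × String)))
    (e : String × List (String × String)) : Option (Nat × String × List (String × String)) :=
  match PySem.Dict.get? pvMedia e.1 with
  | none => best
  | some info =>
    if e.2.isEmpty then best
    else
      match best with
      | none => some (info.1, info.2, e.2)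
      | some b => if info.1 < b.1 then some (info.1, info.2, e.2) else best

def describe_message_media_kind_alt (message : List (String × List (String × String))) : String :=
  match message.foldl pvStep none with
  | none => ""
  | some (rank, label, value) =>
    if rank = 4 then
      let file_name := pvOrStr (PySem.Dict.get? ⟨value⟩ "file_name") "document"
      let mime_type := pvOrStr (PySem.Dict.get? ⟨value⟩ "mime_type") ""
      let parts := if mime_type ≠ "" then [file_name, "(" ++ mime_type ++ ")"] else [file_name]
      PySem.Str.strip (PySem.Str.join " " parts)
    else label

-- ===== PRECONDITION & SPEC =====
-- Pre_ excludes only association lists with duplicate keys: a Python dict cannot contain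
-- duplicate keys, so such lists represent no Python input; on them A's first-match lookups
-- and B's whole-list scan could see different occurrences.
def Pre_describe_message_media_kind (message : List (String × List (String × String))) : Prop :=
  (message.map Prod.fst).Nodup
instance (message : List (String × List (String × String))) : Decidable (Pre_describe_message_media_kind message) := by unfold Pre_describe_message_media_kind; infer_instance

def pvWitness_describe_message_media_kind : (List (String × List (String × String))) :=
  [("photo", [("a", "b")]), ("document", [("file_name", "f.txt")])]

def Spec_describe_message_media_kind (message : List (String × List (String × String))) (out : String) : Prop := out = describe_message_media_kind_alt message
instance (message : List (String × List (String × String))) (out : String) : Decidable (Spec_describe_message_media_kind message out) := by unfold Spec_describe_message_media_kind; infer_instance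

-- ===== CLAIM (what is proved, stated in full; the proofs are below) =====
def Claim_equal_describe_message_media_kind : Prop := ∀ (message : List (String × List (String × String))), Dom_describe_message_media_kind message → Pre_describe_message_media_kind message → Spec_describe_message_media_kind message (describe_message_media_kind message)

-- ===== LEMMAS AND PROOFS =====

-- left-biased merge by minimum rank (what pvStep does to its accumulator)
def pvMerge (a b : Option (Nat × String × List (String × String))) :
    Option (Nat × String × List (String × String)) :=
  match a, b with
  | none, b => b
  | some a, none => some a
  | some a, some b => if b.1 < a.1 then some b else some a

-- priority table as an ordered list: (rank, key, label)
def pvTable : List (Nat × String × String) :=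
  [(0, "photo", "photo"), (1, "voice", "voice"), (2, "video", "video"),
   (3, "video_note", "video_note"), (4, "document", "document"),
   (5, "sticker", "sticker"), (6, "animation", "gif"), (7, "audio", "audio")]

-- A's if-chain as a first-truthy scan over a key table
def pvChain (m : List (String × List (String × String))) :
    List (Nat × String × String) → Option (Nat × String × List (String × String))
  | [] => none
  | (r, key, lab) :: ks =>
    match PySem.Dict.get? ⟨m⟩ key with
    | some v => if v.isEmpty then pvChain m ks else some (r, lab, v)
    | none => pvChain m ks

-- contribution of a single entry (k, v) relative to a key table
def pvEntry (k : String) (v : List (String × String)) :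
    List (Nat × String × String) → Option (Nat × String × List (String × String))
  | [] => none
  | (r, key, lab) :: ks =>
    if key = k then (if v.isEmpty then none else some (r, lab, v)) else pvEntry k v ks

-- the common rendering of the selected entry
def pvRender : Option (Nat × String × List (String × String)) → String
  | none => ""
  | some (rank, label, value) =>
    if rank = 4 then
      let file_name := pvOrStr (PySem.Dict.get? ⟨value⟩ "file_name") "document"
      let mime_type := pvOrStr (PySem.Dict.get? ⟨value⟩ "mime_type") ""
      let parts := if mime_type ≠ "" then [file_name, "(" ++ mime_type ++ ")"] else [file_name]
      PySem.Str.strip (PySem.Str.join " " parts)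
    else label

theorem pvStep_eq_merge (best : Option (Nat × String × List (String × String)))
    (e : String × List (String × String)) :
    pvStep best e = pvMerge best (pvStep none e) := by
  unfold pvStep pvMerge
  cases PySem.Dict.get? pvMedia e.1 with
  | none => cases best <;> rfl
  | some info =>
    cases he : e.2.isEmpty with
    | true => cases best <;> simp
    | false => cases best <;> simp

theorem pvMerge_assoc (a b c : Option (Nat × String × List (String × String))) :
    pvMerge (pvMerge a b) c = pvMerge a (pvMerge b c) := by
  rcases a with _ | ⟨ra, la, va⟩ <;> rcases b with _ | ⟨rb, lb, vb⟩ <;>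
    rcases c with _ | ⟨rc, lc, vc⟩ <;> simp only [pvMerge] <;> try rfl
  all_goals first
    | (by_cases h1 : rb < ra <;> by_cases h2 : rc < rb <;> by_cases h3 : rc < ra <;>
        simp [h1, h2, h3] <;> omega)
    | (by_cases h1 : rb < ra <;> simp [h1])

theorem foldl_pvStep_acc (m : List (String × List (String × String)))
    (a : Option (Nat × String × List (String × String))) :
    m.foldl pvStep a = pvMerge a (m.foldl pvStep none) := by
  induction m generalizing a with
  | nil => cases a <;> rfl
  | cons e m ih =>
    simp only [List.foldl_cons]
    rw [ih (pvStep a e), ih (pvStep none e), pvStep_eq_merge a e, pvMerge_assoc]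

theorem pvEntry_of_empty (k : String) (v : List (String × String)) (hv : v.isEmpty = true) :
    ∀ ks, pvEntry k v ks = none := by
  intro ks
  induction ks with
  | nil => rfl
  | cons p ks ih =>
    obtain ⟨r, key, lab⟩ := p
    unfold pvEntry
    by_cases h : key = k <;> simp [h, hv, ih]

theorem pvChain_rank_mem (m : List (String × List (String × String)))
    (ks : List (Nat × String × String)) (b : Nat) (l : String) (u : List (String × String))
    (h : pvChain m ks = some (b, l, u)) : b ∈ ks.map (·.1) := by
  induction ks with
  | nil => simp [pvChain] at h
  | cons p ks ih =>
    obtain ⟨r, key, lab⟩ := p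
    unfold pvChain at h
    split at h
    · split at h
      · simpa using Or.inr (ih h)
      · simp only [Option.some.injEq, Prod.mk.injEq] at h
        simp [h.1]
    · simpa using Or.inr (ih h)

theorem pvEntry_rank_mem (k : String) (v : List (String × String))
    (ks : List (Nat × String × String)) (b : Nat) (l : String) (u : List (String × String))
    (h : pvEntry k v ks = some (b, l, u)) : b ∈ ks.map (·.1) := by
  induction ks with
  | nil => simp [pvEntry] at h
  | cons p ks ih =>
    obtain ⟨r, key, lab⟩ := p
    unfold pvEntry at h
    split at h
    · split at h
      · simp at h
      · simp only [Option.some.injEq, Prod.mk.injEq] at h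
        simp [h.1]
    · simpa using Or.inr (ih h)

theorem pvChain_cons (m : List (String × List (String × String))) (k : String)
    (v : List (String × String)) (h : PySem.Dict.get? ⟨m⟩ k = none)
    (ks : List (Nat × String × String))
    (hpw : ks.Pairwise (fun a b => a.1 < b.1)) :
    pvChain ((k, v) :: m) ks = pvMerge (pvEntry k v ks) (pvChain m ks) := by
  induction ks with
  | nil => rfl
  | cons p ks ih =>
    obtain ⟨r, key, lab⟩ := p
    rw [List.pairwise_cons] at hpw
    obtain ⟨hr, hpw'⟩ := hpw
    by_cases hk : k = key
    · subst hk
      have hcons : PySem.Dict.get? ⟨(k, v) :: m⟩ k = some v := by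
        rw [PySem.Dict.get?_mk_cons]; simp
      cases hv : v.isEmpty with
      | true =>
        have hL : pvChain ((k, v) :: m) ((r, k, lab) :: ks) = pvChain ((k, v) :: m) ks := by
          simp [pvChain, hcons, hv]
        rw [hL, ih hpw']
        simp [pvChain, pvEntry, h, hv, pvEntry_of_empty k v hv]
      | false =>
        have hL : pvChain ((k, v) :: m) ((r, k, lab) :: ks) = some (r, lab, v) := by
          simp [pvChain, hcons, hv]
        have hE : pvEntry k v ((r, k, lab) :: ks) = some (r, lab, v) := by
          simp [pvEntry, hv]
        have hC : pvChain m ((r, k, lab) :: ks) = pvChain m ks := by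
          simp [pvChain, h]
        rw [hL, hE, hC]
        cases hc : pvChain m ks with
        | none => rfl
        | some b =>
          obtain ⟨br, bl, bu⟩ := b
          have hmem := pvChain_rank_mem m ks br bl bu hc
          simp only [List.mem_map] at hmem
          obtain ⟨x, hx, hxr⟩ := hmem
          have hlt : r < br := hxr ▸ hr x hx
          simp [pvMerge, Nat.not_lt.mpr (Nat.le_of_lt hlt)]
    · have hcons : PySem.Dict.get? ⟨(k, v) :: m⟩ key = PySem.Dict.get? ⟨m⟩ key := by
        rw [PySem.Dict.get?_mk_cons]; simp [hk]
      have hkk : ¬ key = k := Ne.symm hk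
      have hE : pvEntry k v ((r, key, lab) :: ks) = pvEntry k v ks := by
        simp [pvEntry, hkk]
      cases hg : PySem.Dict.get? ⟨m⟩ key with
      | none =>
        have hL : pvChain ((k, v) :: m) ((r, key, lab) :: ks) = pvChain ((k, v) :: m) ks := by
          simp [pvChain, hcons, hg]
        have hC : pvChain m ((r, key, lab) :: ks) = pvChain m ks := by
          simp [pvChain, hg]
        rw [hL, hC, hE, ih hpw']
      | some v0 =>
        cases hv0 : v0.isEmpty with
        | true =>
          have hL : pvChain ((k, v) :: m) ((r, key, lab) :: ks) = pvChain ((k, v) :: m) ks := by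
            simp [pvChain, hcons, hg, hv0]
          have hC : pvChain m ((r, key, lab) :: ks) = pvChain m ks := by
            simp [pvChain, hg, hv0]
          rw [hL, hC, hE, ih hpw']
        | false =>
          have hL : pvChain ((k, v) :: m) ((r, key, lab) :: ks) = some (r, lab, v0) := by
            simp [pvChain, hcons, hg, hv0]
          have hC : pvChain m ((r, key, lab) :: ks) = some (r, lab, v0) := by
            simp [pvChain, hg, hv0]
          rw [hL, hC, hE]
          cases he : pvEntry k v ks with
          | none => rfl
          | some b =>
            obtain ⟨br, bl, bu⟩ := b
            have hmem := pvEntry_rank_mem k v ks br bl bu he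
            simp only [List.mem_map] at hmem
            obtain ⟨x, hx, hxr⟩ := hmem
            have hlt : r < br := hxr ▸ hr x hx
            simp [pvMerge, hlt]

theorem get?_none_of_not_mem (m : List (String × List (String × String))) (k : String)
    (h : k ∉ m.map Prod.fst) : PySem.Dict.get? ⟨m⟩ k = none := by
  induction m with
  | nil => rfl
  | cons e m ih =>
    obtain ⟨ek, ev⟩ := e
    simp only [List.map_cons, List.mem_cons, not_or] at h
    rw [PySem.Dict.get?_mk_cons]
    have : (ek == k) = false := by
      have hne : ek ≠ k := fun hh => h.1 hh.symm
      simp [hne]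
    rw [this]
    simp only [Bool.false_eq_true, if_false]
    exact ih h.2

theorem pvStep_none_eq_entry (k : String) (v : List (String × String)) :
    pvStep none (k, v) = pvEntry k v pvTable := by
  by_cases h0 : k = "photo"
  · subst h0; cases hv : v.isEmpty <;> simp [pvStep, pvEntry, pvMedia, pvTable, hv, PySem.Dict.get?]
  · by_cases h1 : k = "voice"
    · subst h1; cases hv : v.isEmpty <;> simp [pvStep, pvEntry, pvMedia, pvTable, hv, PySem.Dict.get?]
    · by_cases h2 : k = "video"
      · subst h2; cases hv : v.isEmpty <;> simp [pvStep, pvEntry, pvMedia, pvTable, hv, PySem.Dict.get?]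
      · by_cases h3 : k = "video_note"
        · subst h3; cases hv : v.isEmpty <;> simp [pvStep, pvEntry, pvMedia, pvTable, hv, PySem.Dict.get?]
        · by_cases h4 : k = "document"
          · subst h4; cases hv : v.isEmpty <;> simp [pvStep, pvEntry, pvMedia, pvTable, hv, PySem.Dict.get?]
          · by_cases h5 : k = "sticker"
            · subst h5; cases hv : v.isEmpty <;> simp [pvStep, pvEntry, pvMedia, pvTable, hv, PySem.Dict.get?]
            · by_cases h6 : k = "animation"
              · subst h6; cases hv : v.isEmpty <;> simp [pvStep, pvEntry, pvMedia, pvTable, hv, PySem.Dict.get?]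
              · by_cases h7 : k = "audio"
                · subst h7; cases hv : v.isEmpty <;> simp [pvStep, pvEntry, pvMedia, pvTable, hv, PySem.Dict.get?]
                · simp [pvStep, pvEntry, pvMedia, pvTable, PySem.Dict.get?,
                    Ne.symm h0, Ne.symm h1, Ne.symm h2, Ne.symm h3, Ne.symm h4,
                    Ne.symm h5, Ne.symm h6, Ne.symm h7, h0, h1, h2, h3, h4, h5, h6, h7]

theorem scan_eq_chain (m : List (String × List (String × String)))
    (h : (m.map Prod.fst).Nodup) : m.foldl pvStep none = pvChain m pvTable := by
  induction m with
  | nil => rfl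
  | cons e m ih =>
    obtain ⟨k, v⟩ := e
    simp only [List.map_cons, List.nodup_cons] at h
    simp only [List.foldl_cons]
    rw [foldl_pvStep_acc, pvStep_none_eq_entry, ih h.2,
      ← pvChain_cons m k v (get?_none_of_not_mem m k h.1) pvTable (by decide)]

-- the document slot's file_name is never empty
theorem pvOrStr_document_ne (o : Option String) : pvOrStr o "document" ≠ "" := by
  cases o with
  | none => simp [pvOrStr]
  | some s =>
    simp only [pvOrStr]
    by_cases h : s = "" <;> simp [h]

-- A's filtered-join document string equals the render's document string
theorem docA_eq_docB (d : List (String × String)) :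
    PySem.Str.strip (PySem.Str.join " "
      (([pvOrStr (PySem.Dict.get? ⟨d⟩ "file_name") "document",
         if pvOrStr (PySem.Dict.get? ⟨d⟩ "mime_type") "" ≠ "" then
           "(" ++ pvOrStr (PySem.Dict.get? ⟨d⟩ "mime_type") "" ++ ")" else ""]).filter
        (fun part => part ≠ "")))
      = PySem.Str.strip (PySem.Str.join " "
          (if pvOrStr (PySem.Dict.get? ⟨d⟩ "mime_type") "" ≠ "" then
            [pvOrStr (PySem.Dict.get? ⟨d⟩ "file_name") "document",
             "(" ++ pvOrStr (PySem.Dict.get? ⟨d⟩ "mime_type") "" ++ ")"]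
          else [pvOrStr (PySem.Dict.get? ⟨d⟩ "file_name") "document"])) := by
  have hfn := pvOrStr_document_ne (PySem.Dict.get? ⟨d⟩ "file_name")
  by_cases hm : pvOrStr (PySem.Dict.get? ⟨d⟩ "mime_type") "" = ""
  · simp [hm, List.filter, hfn]
  · have hparen : ("(" ++ pvOrStr (PySem.Dict.get? ⟨d⟩ "mime_type") "" ++ ")") ≠ "" := by
      intro h
      have := congrArg String.toList h
      simp at this
    simp [hm, List.filter, hfn, hparen]

theorem render_chain_const (m : List (String × List (String × String))) (r : Nat)
    (key lab : String) (ks : List (Nat × String × String)) (hr : r ≠ 4) :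
    pvRender (pvChain m ((r, key, lab) :: ks))
      = if pvTruthy (PySem.Dict.get? ⟨m⟩ key) then lab else pvRender (pvChain m ks) := by
  rw [pvChain]
  cases hg : PySem.Dict.get? ⟨m⟩ key with
  | none => simp [pvTruthy]
  | some v =>
    cases hv : v.isEmpty with
    | true => simp [pvTruthy, hv]
    | false => simp [pvTruthy, hv, pvRender, hr]

theorem render_chain_doc (m : List (String × List (String × String)))
    (ks : List (Nat × String × String)) :
    pvRender (pvChain m ((4, "document", "document") :: ks))
      = if pvTruthy (PySem.Dict.get? ⟨m⟩ "document") then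
          PySem.Str.strip (PySem.Str.join " "
            (([pvOrStr (PySem.Dict.get? ⟨pvOrDict (PySem.Dict.get? ⟨m⟩ "document")⟩ "file_name") "document",
               if pvOrStr (PySem.Dict.get? ⟨pvOrDict (PySem.Dict.get? ⟨m⟩ "document")⟩ "mime_type") "" ≠ "" then
                 "(" ++ pvOrStr (PySem.Dict.get? ⟨pvOrDict (PySem.Dict.get? ⟨m⟩ "document")⟩ "mime_type") "" ++ ")"
               else ""]).filter (fun part => part ≠ "")))
        else pvRender (pvChain m ks) := by
  rw [pvChain]
  cases hg : PySem.Dict.get? ⟨m⟩ "document" with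
  | none => simp [pvTruthy]
  | some v =>
    cases hv : v.isEmpty with
    | true => simp [pvTruthy, hv]
    | false =>
      simp only [pvTruthy, hv, Bool.not_false, if_true, Bool.false_eq_true, if_false, pvOrDict,
        pvRender]
      rw [docA_eq_docB v]

theorem A_eq_render (m : List (String × List (String × String))) :
    describe_message_media_kind m = pvRender (pvChain m pvTable) := by
  unfold describe_message_media_kind pvTable
  rw [render_chain_const m 0 _ _ _ (by decide), render_chain_const m 1 _ _ _ (by decide),
    render_chain_const m 2 _ _ _ (by decide), render_chain_const m 3 _ _ _ (by decide),
    render_chain_doc, render_chain_const m 5 _ _ _ (by decide),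
    render_chain_const m 6 _ _ _ (by decide), render_chain_const m 7 _ _ _ (by decide)]
  simp only [pvChain, pvRender]

theorem B_eq_render (m : List (String × List (String × String))) :
    describe_message_media_kind_alt m = pvRender (m.foldl pvStep none) := by
  unfold describe_message_media_kind_alt pvRender
  cases m.foldl pvStep none with
  | none => rfl
  | some b => rfl

-- ===== VERDICT (by name: the statement is the Claim_ definition above) =====
theorem describe_message_media_kind_spec : Claim_equal_describe_message_media_kind := by
  intro m _ hpre
  unfold Spec_describe_message_media_kind
  rw [A_eq_render, B_eq_render, scan_eq_chain m hpre]
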